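-- pv_equiv track=rewrite | github.com/K-tuna/Baekjoon-Programmers | 프로그래머스/lv2/42586. 기능개발/기능개발.py | solution
-- ===== SOURCE A (Python) =====
-- def solution(progresses, speeds):
--     finish=[]
--     ans=[]
--     for i in range(len(progresses)):
--         cnt=0
--         while progresses[i]<100:
--             progresses[i]+=speeds[i]
--             cnt+=1
--         finish.append(cnt)
--     finish+=[101]
--
--     start,end=0,0
--     for i in range(len(finish)):
--         if finish[start]>=finish[end]:
--             end+=1
--         else:
--             ans.append(end-start)
--             start=end
--             end+=1
--     return ans
-- ===== SOURCE B (Python) =====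
-- def solution(progresses, speeds):
--     # Closed-form completion day per task, then one grouping scan.
--     # Note: unlike the original, this does not mutate `progresses` in place;
--     # the equivalence claimed is about the return value only.
--     days = []
--     for p, s in zip(progresses, speeds):
--         days.append(0 if p >= 100 else -(-(100 - p) // s))
--     ans = []
--     leader = 0
--     cnt = 0
--     for d in days:
--         if cnt and d <= leader:
--             cnt += 1
--         else:
--             if cnt:
--                 ans.append(cnt)
--             leader, cnt = d, 1
--     if cnt:
--         ans.append(cnt)
--     return ans
-- ===== Notes on version B (the rewrite author's own statement) =====
-- stated objective: alternative
-- what changed: Replaces the per-task incremental while-loop with a closed-form ceiling-division finish day and replaces the index/sentinel grouping pass (start/end indices over finish+[101]) with a single leader-and-count scan over the day list; A also mutates progresses in place, B does not.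
-- intended difference: On inputs where some task needs more than 100 days (progress + 100*speed < 100 with speed >= 1), A's 101 sentinel fails to flush the final deployment group and A silently drops it (e.g. A([-1],[1]) = []); B returns the full grouping ([1]), which is the intended answer. — e.g. on solution([-1], [1]): A returns [], B returns [1]
-- outside the precondition, e.g. on solution([100], []): A returns [1], B returns []
import Mathlib
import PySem

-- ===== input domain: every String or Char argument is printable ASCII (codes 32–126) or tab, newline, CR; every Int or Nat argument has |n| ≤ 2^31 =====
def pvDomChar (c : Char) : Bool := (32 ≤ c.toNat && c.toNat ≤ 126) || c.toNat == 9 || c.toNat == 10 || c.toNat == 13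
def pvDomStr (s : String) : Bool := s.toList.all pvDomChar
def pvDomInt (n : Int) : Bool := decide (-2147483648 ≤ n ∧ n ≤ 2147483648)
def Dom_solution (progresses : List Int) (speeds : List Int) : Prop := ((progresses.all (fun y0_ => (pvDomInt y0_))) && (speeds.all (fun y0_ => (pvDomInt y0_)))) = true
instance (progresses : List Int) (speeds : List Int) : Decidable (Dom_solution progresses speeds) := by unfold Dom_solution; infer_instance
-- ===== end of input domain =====

-- B computes each task's finish day by a closed-form ceiling division instead of A's
-- step-by-step while loop, and groups by one leader/count scan without A's index
-- bookkeeping and 101 sentinel. A mutates `progresses` in place, B does not: the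
-- equivalence proved here is about the return value only.


-- ===== PORT A =====
-- the inner 'while progresses[i] < 100: progresses[i] += speeds[i]; cnt += 1' loop,
-- state (p, cnt); the '1 ≤ s' test only makes the recursion total — Python diverges
-- there (those inputs are excluded by Pre_solution)
def solutionWhile (p s cnt : Int) : Int :=
  if _h : p < 100 then
    if _h2 : 1 ≤ s then solutionWhile (p + s) s (cnt + 1) else cnt
  else cnt
termination_by (100 - p).toNat
decreasing_by omega

-- the body of A's second loop ('for i in range(len(finish))'), state (start, end, ans);
-- the loop variable i is unused by the body
def solutionStepA (finish2 : List Int) (st : Int × Int × List Int) (_i : Int) :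
    Int × Int × List Int :=
  if PySem.List.pyGetD finish2 st.2.1 0 ≤ PySem.List.pyGetD finish2 st.1 0 then
    (st.1, st.2.1 + 1, st.2.2)
  else
    (st.2.1, st.2.1 + 1, st.2.2 ++ [st.2.1 - st.1])

def solution (progresses : List Int) (speeds : List Int) : List Int :=
  let finish := (PySem.List.pyRange 0 progresses.length 1).foldl
    (fun acc i =>
      acc ++ [solutionWhile (PySem.List.pyGetD progresses i 0) (PySem.List.pyGetD speeds i 0) 0])
    []
  let finish2 := finish ++ [101]
  let r := (PySem.List.pyRange 0 finish2.length 1).foldl (solutionStepA finish2)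
    ((0 : Int), (0 : Int), ([] : List Int))
  r.2.2

-- ===== PORT B =====
-- '0 if p >= 100 else -(-(100 - p) // s)'
def solutionDay (p s : Int) : Int :=
  if 100 ≤ p then 0 else -(PySem.Int.floordiv (-(100 - p)) s)

-- body of B's grouping loop, state (leader, cnt, ans)
def solutionStep (st : Int × Int × List Int) (d : Int) : Int × Int × List Int :=
  if st.2.1 ≠ 0 ∧ d ≤ st.1 then (st.1, st.2.1 + 1, st.2.2)
  else (d, 1, if st.2.1 ≠ 0 then st.2.2 ++ [st.2.1] else st.2.2)

def solution_alt (progresses : List Int) (speeds : List Int) : List Int :=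
  let days := (progresses.zip speeds).map (fun x : Int × Int => solutionDay x.1 x.2)
  let r := days.foldl solutionStep ((0 : Int), (0 : Int), ([] : List Int))
  if r.2.1 ≠ 0 then r.2.2 ++ [r.2.1] else r.2.2

-- ===== PRECONDITION & SPEC =====
-- Pre_ excludes (a) inputs where A never terminates (some task with progress < 100 and
-- speed ≤ 0) and (b) speeds shorter than progresses: there A raises IndexError, except
-- in the degenerate corner where every unmatched progress is already ≥ 100 (see cites),
-- which is excluded with the same length condition.
def Pre_solution (progresses : List Int) (speeds : List Int) : Prop :=
  progresses.length ≤ speeds.length ∧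
    ∀ x ∈ progresses.zip speeds, 100 ≤ x.1 ∨ 1 ≤ x.2

instance (progresses : List Int) (speeds : List Int) : Decidable (Pre_solution progresses speeds) := by
  unfold Pre_solution; infer_instance

def pvWitness_solution : List Int × List Int := ([93, 30, 55], [1, 30, 5])

-- On inputs where some task needs more than 100 days (progress + 100*speed < 100 with
-- speed ≥ 1), A's '101' sentinel fails to flush the final deployment group and A silently
-- drops it; B returns the full grouping, which is the intended answer.
def D_solution (progresses : List Int) (speeds : List Int) : Prop :=
  ∃ x ∈ progresses.zip speeds, 1 ≤ x.2 ∧ x.1 + 100 * x.2 < 100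

instance (progresses : List Int) (speeds : List Int) : Decidable (D_solution progresses speeds) := by
  unfold D_solution; infer_instance

def Spec_solution (progresses : List Int) (speeds : List Int) (out : List Int) : Prop :=
  ¬ D_solution progresses speeds → out = solution_alt progresses speeds

instance (progresses : List Int) (speeds : List Int) (out : List Int) : Decidable (Spec_solution progresses speeds out) := by
  unfold Spec_solution; infer_instance

def pvDiffWitness_solution : List Int × List Int := ([-1], [1])

def pvDiffWitnessOut_solution : (List Int) × (List Int) := ([], [1])

-- ===== CLAIM (what is proved, stated in full; the proofs are below) =====
def Claim_unchanged_solution : Prop := ∀ (progresses : List Int) (speeds : List Int), Dom_solution progresses speeds → Pre_solution progresses speeds → Spec_solution progresses speeds (solution progresses speeds)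

def Claim_changed_solution : Prop := Dom_solution (pvDiffWitness_solution.1) (pvDiffWitness_solution.2) ∧ Pre_solution (pvDiffWitness_solution.1) (pvDiffWitness_solution.2) ∧ D_solution (pvDiffWitness_solution.1) (pvDiffWitness_solution.2) ∧ solution (pvDiffWitness_solution.1) (pvDiffWitness_solution.2) = pvDiffWitnessOut_solution.1 ∧ solution_alt (pvDiffWitness_solution.1) (pvDiffWitness_solution.2) = pvDiffWitnessOut_solution.2 ∧ pvDiffWitnessOut_solution.1 ≠ pvDiffWitnessOut_solution.2

def Claim_exact_solution : Prop := ∀ (progresses : List Int) (speeds : List Int), Dom_solution progresses speeds → Pre_solution progresses speeds → D_solution progresses speeds → solution progresses speeds ≠ solution_alt progresses speeds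

-- ===== LEMMAS AND PROOFS =====

-- value-level form of A's grouping loop: leader value, current count, output so far
def pvGroupA (L c : Int) (ans : List Int) : List Int → List Int
  | [] => ans
  | f :: rest => if f ≤ L then pvGroupA L (c + 1) ans rest else pvGroupA f 1 (ans ++ [c]) rest

theorem pvStep_pos (L c d : Int) (ans : List Int) (h1 : c ≠ 0) (h2 : d ≤ L) :
    solutionStep (L, c, ans) d = (L, c + 1, ans) := by
  simp [solutionStep, h1, h2]

theorem pvStep_neg (L c d : Int) (ans : List Int) (h : ¬ (c ≠ 0 ∧ d ≤ L)) :
    solutionStep (L, c, ans) d = (d, 1, if c ≠ 0 then ans ++ [c] else ans) := by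
  simp only [solutionStep, if_neg h]

theorem pvDay_brackets (p s : Int) (hp : p < 100) (hs : 1 ≤ s) :
    (solutionDay p s - 1) * s < 100 - p ∧ 100 - p ≤ solutionDay p s * s := by
  have h0 : (0 : Int) < s := by omega
  have := (PySem.Int.neg_floordiv_neg_eq_iff_of_pos (a := 100 - p) (b := s)
    (q := solutionDay p s) h0).mp ?_
  · exact this
  · simp [solutionDay, show ¬ (100 ≤ p) by omega]

theorem pvDay_succ (p s : Int) (hp : p < 100) (hs : 1 ≤ s) :
    solutionDay p s = 1 + solutionDay (p + s) s := by
  have h0 : (0 : Int) < s := by omega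
  by_cases hp2 : p + s < 100
  · have hb := pvDay_brackets (p + s) s hp2 hs
    have : -(PySem.Int.floordiv (-(100 - p)) s) = solutionDay (p + s) s + 1 := by
      rw [PySem.Int.neg_floordiv_neg_eq_iff_of_pos h0]
      constructor <;> nlinarith [hb.1, hb.2]
    simp [solutionDay, show ¬ (100 ≤ p) by omega] at this ⊢
    omega
  · have hd2 : solutionDay (p + s) s = 0 := by simp [solutionDay, show 100 ≤ p + s by omega]
    have h1 : -(PySem.Int.floordiv (-(100 - p)) s) = 1 := by
      rw [PySem.Int.neg_floordiv_neg_eq_iff_of_pos h0]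
      constructor <;> nlinarith
    simp only [solutionDay, if_neg (show ¬ (100 ≤ p) by omega), h1]
    omega

theorem pvWhile_eq (p s : Int) (h : 100 ≤ p ∨ 1 ≤ s) (cnt : Int) :
    solutionWhile p s cnt = cnt + solutionDay p s := by
  by_cases hp : p < 100
  · have hs : 1 ≤ s := by omega
    rw [solutionWhile]
    simp only [hp, hs, dif_pos]
    rw [pvWhile_eq (p + s) s (Or.inr hs) (cnt + 1), pvDay_succ p s hp hs]
    ring
  · rw [solutionWhile]
    simp [solutionDay, show 100 ≤ p by omega]
termination_by (100 - p).toNat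
decreasing_by omega

theorem pvDay_high (p s : Int) (h : 100 ≤ p ∨ 1 ≤ s) :
    101 ≤ solutionDay p s ↔ (1 ≤ s ∧ p + 100 * s < 100) := by
  by_cases hp : 100 ≤ p
  · constructor
    · intro hq
      simp [solutionDay, hp] at hq
    · rintro ⟨hs, hlt⟩
      nlinarith
  · have hs : 1 ≤ s := by omega
    have hb := pvDay_brackets p s (by omega) hs
    constructor
    · intro hq
      refine ⟨hs, ?_⟩
      nlinarith [hb.1]
    · rintro ⟨-, hlt⟩
      nlinarith [hb.2]

theorem pvFinish_eq (progresses speeds : List Int)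
    (hlen : progresses.length ≤ speeds.length)
    (hpre : ∀ x ∈ progresses.zip speeds, 100 ≤ x.1 ∨ 1 ≤ x.2) :
    (PySem.List.pyRange 0 progresses.length 1).foldl
      (fun acc i =>
        acc ++ [solutionWhile (PySem.List.pyGetD progresses i 0) (PySem.List.pyGetD speeds i 0) 0])
      []
      = (progresses.zip speeds).map (fun x : Int × Int => solutionDay x.1 x.2) := by
  rw [PySem.List.foldl_append_singleton_eq_map]
  apply List.ext_getElem
  · simp [PySem.List.length_pyRange_one]
    omega
  · intro k h1 h2
    have hkp : k < progresses.length := by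
      simp [PySem.List.length_pyRange_one] at h1
      omega
    have hks : k < speeds.length := by omega
    have hkz : k < (progresses.zip speeds).length := by
      rw [List.length_zip]
      omega
    simp only [List.nil_append, List.getElem_map]
    rw [PySem.List.getElem_pyRange_one]
    have hz : (progresses.zip speeds)[k] = (progresses[k], speeds[k]) := by
      simp [List.getElem_zip]
    rw [hz]
    have hgp : PySem.List.pyGetD progresses ((0 : Int) + (k : Int)) 0 = progresses[k] := by
      rw [zero_add, PySem.List.pyGetD_natCast]
      simp [hkp]
    have hgs : PySem.List.pyGetD speeds ((0 : Int) + (k : Int)) 0 = speeds[k] := by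
      rw [zero_add, PySem.List.pyGetD_natCast]
      simp [hks]
    rw [hgp, hgs]
    have hmem : (progresses[k], speeds[k]) ∈ progresses.zip speeds := by
      rw [← hz]
      exact List.getElem_mem hkz
    rw [pvWhile_eq _ _ (hpre _ hmem) 0, zero_add]

theorem pvBridge (F : List Int) (m : Nat) : ∀ (st e : Nat) (ans : List Int),
    e + m = F.length → st ≤ e → st < F.length →
    ((PySem.List.pyRange (e : Int) (F.length : Int) 1).foldl (solutionStepA F)
        ((st : Int), (e : Int), ans)).2.2
      = pvGroupA (PySem.List.pyGetD F (st : Int) 0) ((e : Int) - (st : Int)) ans (F.drop e) := by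
  induction m with
  | zero =>
    intro st e ans hm hse hst
    rw [PySem.List.pyRange_one_eq_nil (by omega)]
    rw [List.drop_eq_nil_of_le (by omega)]
    simp [pvGroupA]
  | succ n ih =>
    intro st e ans hm hse hst
    have he : e < F.length := by omega
    rw [PySem.List.pyRange_one_cons (by exact_mod_cast he)]
    rw [List.foldl_cons]
    have hdrop : F.drop e = F[e] :: F.drop (e + 1) := List.drop_eq_getElem_cons he
    rw [hdrop]
    have hge : PySem.List.pyGetD F (e : Int) 0 = F[e] := by
      rw [PySem.List.pyGetD_natCast]
      simp [he]
    rw [show solutionStepA F ((st : Int), (e : Int), ans) (e : Int)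
        = if F[e] ≤ PySem.List.pyGetD F (st : Int) 0
          then ((st : Int), (e : Int) + 1, ans)
          else ((e : Int), (e : Int) + 1, ans ++ [(e : Int) - (st : Int)])
      from by simp [solutionStepA, hge]]
    by_cases hc : F[e] ≤ PySem.List.pyGetD F (st : Int) 0
    · rw [if_pos hc]
      have := ih st (e + 1) ans (by omega) (by omega) hst
      push_cast at this ⊢
      rw [this]
      rw [pvGroupA]
      rw [if_pos hc]
      ring_nf
    · rw [if_neg hc]
      have := ih e (e + 1) (ans ++ [(e : Int) - (st : Int)]) (by omega) (by omega) he
      push_cast at this ⊢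
      rw [this, hge]
      rw [pvGroupA]
      rw [if_neg hc]
      ring_nf

theorem pvFold_cnt_pos (D' : List Int) : ∀ (L c : Int) (ans : List Int), 1 ≤ c →
    1 ≤ (D'.foldl solutionStep (L, c, ans)).2.1 := by
  induction D' with
  | nil =>
    intro L c ans hc
    simpa using hc
  | cons d rest ih =>
    intro L c ans hc
    rw [List.foldl_cons]
    by_cases h : c ≠ 0 ∧ d ≤ L
    · rw [pvStep_pos L c d ans h.1 h.2]
      exact ih L (c + 1) ans (by omega)
    · rw [pvStep_neg L c d ans h]
      exact ih d 1 _ (le_refl 1)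

theorem pvMain (D' : List Int) : ∀ (L c : Int) (ans : List Int), 1 ≤ c →
    pvGroupA L c ans (D' ++ [101]) =
      (if 101 ≤ (D'.foldl solutionStep (L, c, ans)).1
       then (D'.foldl solutionStep (L, c, ans)).2.2
       else (D'.foldl solutionStep (L, c, ans)).2.2 ++ [(D'.foldl solutionStep (L, c, ans)).2.1]) := by
  induction D' with
  | nil =>
    intro L c ans hc
    simp only [List.nil_append, List.foldl_nil]
    rw [pvGroupA]
    by_cases h : (101 : Int) ≤ L
    · rw [if_pos h, if_pos h, pvGroupA]
    · rw [if_neg h, if_neg h, pvGroupA]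
  | cons d rest ih =>
    intro L c ans hc
    rw [List.cons_append, pvGroupA, List.foldl_cons]
    by_cases h : d ≤ L
    · rw [if_pos h, pvStep_pos L c d ans (by omega) h]
      exact ih L (c + 1) ans (by omega)
    · rw [if_neg h, pvStep_neg L c d ans (by rintro ⟨-, h2⟩; exact h h2)]
      rw [if_pos (show c ≠ 0 by omega)]
      exact ih d 1 (ans ++ [c]) (le_refl 1)

theorem pvFold_leader_mono (D' : List Int) : ∀ (L c : Int) (ans : List Int), 1 ≤ c →
    L ≤ (D'.foldl solutionStep (L, c, ans)).1 := by
  induction D' with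
  | nil =>
    intro L c ans _
    simp
  | cons d rest ih =>
    intro L c ans hc
    rw [List.foldl_cons]
    by_cases h : d ≤ L
    · rw [pvStep_pos L c d ans (by omega) h]
      exact ih L (c + 1) ans (by omega)
    · rw [pvStep_neg L c d ans (by rintro ⟨-, h2⟩; exact h h2)]
      have := ih d 1 (if c ≠ 0 then ans ++ [c] else ans) (le_refl 1)
      omega

theorem pvFold_leader_ge_mem (D' : List Int) : ∀ (L c : Int) (ans : List Int), 1 ≤ c →
    ∀ d ∈ D', d ≤ (D'.foldl solutionStep (L, c, ans)).1 := by
  induction D' with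
  | nil =>
    intro L c ans _ d hd
    cases hd
  | cons d0 rest ih =>
    intro L c ans hc d hd
    rw [List.foldl_cons]
    rcases List.mem_cons.mp hd with rfl | hmem
    · by_cases h : d ≤ L
      · rw [pvStep_pos L c d ans (by omega) h]
        have := pvFold_leader_mono rest L (c + 1) ans (by omega)
        omega
      · rw [pvStep_neg L c d ans (by rintro ⟨-, h2⟩; exact h h2)]
        exact pvFold_leader_mono rest d 1 _ (le_refl 1)
    · by_cases h : d0 ≤ L
      · rw [pvStep_pos L c d0 ans (by omega) h]
        exact ih L (c + 1) ans (by omega) d hmem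
      · rw [pvStep_neg L c d0 ans (by rintro ⟨-, h2⟩; exact h h2)]
        exact ih d0 1 _ (le_refl 1) d hmem

theorem pvFold_leader_le (D' : List Int) : ∀ (L c : Int) (ans : List Int), 1 ≤ c →
    L ≤ 100 → (∀ d ∈ D', d ≤ 100) →
    (D'.foldl solutionStep (L, c, ans)).1 ≤ 100 := by
  induction D' with
  | nil =>
    intro L c ans _ hL _
    simpa using hL
  | cons d rest ih =>
    intro L c ans hc hL hall
    rw [List.foldl_cons]
    by_cases h : d ≤ L
    · rw [pvStep_pos L c d ans (by omega) h]
      exact ih L (c + 1) ans (by omega) hL (fun x hx => hall x (List.mem_cons_of_mem _ hx))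
    · rw [pvStep_neg L c d ans (by rintro ⟨-, h2⟩; exact h h2)]
      exact ih d 1 _ (le_refl 1) (hall d (List.mem_cons_self))
        (fun x hx => hall x (List.mem_cons_of_mem _ hx))

theorem pvGetD_zero (a : Int) (l : List Int) : PySem.List.pyGetD (a :: l) 0 0 = a := by
  simp [PySem.List.pyGetD, PySem.List.pyGet?, PySem.List.pyIdx?]

-- shape of A's result under Pre_: B's grouping fold, final group kept iff final leader < 101
theorem pvA_shape (progresses speeds : List Int)
    (hpre : Pre_solution progresses speeds) :
    solution progresses speeds =
      (match (progresses.zip speeds).map (fun x : Int × Int => solutionDay x.1 x.2) with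
       | [] => []
       | d0 :: rest =>
         let r := rest.foldl solutionStep (d0, 1, ([] : List Int))
         if 101 ≤ r.1 then r.2.2 else r.2.2 ++ [r.2.1]) := by
  unfold solution
  rw [pvFinish_eq progresses speeds hpre.1 hpre.2]
  have hb := pvBridge ((progresses.zip speeds).map (fun x : Int × Int => solutionDay x.1 x.2) ++ [101])
    ((progresses.zip speeds).map (fun x : Int × Int => solutionDay x.1 x.2) ++ [101]).length 0 0 []
    (by omega) (le_refl 0) (by simp)
  push_cast at hb
  simp only [List.drop_zero] at hb
  rw [hb]
  cases hd : (progresses.zip speeds).map (fun x : Int × Int => solutionDay x.1 x.2) with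
  | nil =>
    simp only [List.nil_append]
    have hg : PySem.List.pyGetD ([(101 : Int)] : List Int) 0 0 = 101 := pvGetD_zero 101 []
    rw [hg, pvGroupA]
    norm_num
    rw [pvGroupA]
  | cons d0 rest =>
    simp only [List.cons_append]
    have hg : PySem.List.pyGetD (d0 :: (rest ++ [101])) 0 0 = d0 := pvGetD_zero d0 (rest ++ [101])
    rw [hg, pvGroupA, if_pos (le_refl d0), zero_add]
    rw [pvMain rest d0 1 [] (le_refl 1)]

-- shape of B's result: same fold, final group always kept
theorem pvB_shape (progresses speeds : List Int) :
    solution_alt progresses speeds =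
      (match (progresses.zip speeds).map (fun x : Int × Int => solutionDay x.1 x.2) with
       | [] => []
       | d0 :: rest =>
         let r := rest.foldl solutionStep (d0, 1, ([] : List Int))
         r.2.2 ++ [r.2.1]) := by
  unfold solution_alt
  cases hd : (progresses.zip speeds).map (fun x : Int × Int => solutionDay x.1 x.2) with
  | nil => simp
  | cons d0 rest =>
    simp only [List.foldl_cons]
    have hstep : solutionStep ((0 : Int), (0 : Int), ([] : List Int)) d0 = (d0, 1, []) := by
      norm_num [solutionStep]
    rw [hstep]
    have hpos := pvFold_cnt_pos rest d0 1 [] (le_refl 1)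
    rw [if_pos (show (rest.foldl solutionStep (d0, 1, ([] : List Int))).2.1 ≠ 0 by omega)]

-- under Pre_, the D_ condition is exactly 'some finish day is ≥ 101'
theorem pvD_iff (progresses speeds : List Int)
    (hpre : Pre_solution progresses speeds) :
    D_solution progresses speeds ↔
      ∃ d ∈ (progresses.zip speeds).map (fun x : Int × Int => solutionDay x.1 x.2), 101 ≤ d := by
  unfold D_solution
  constructor
  · rintro ⟨x, hx, hs, hlt⟩
    exact ⟨solutionDay x.1 x.2, List.mem_map_of_mem hx,
      (pvDay_high x.1 x.2 (hpre.2 x hx)).mpr ⟨hs, hlt⟩⟩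
  · rintro ⟨d, hd, h101⟩
    rcases List.mem_map.mp hd with ⟨x, hx, rfl⟩
    exact ⟨x, hx, (pvDay_high x.1 x.2 (hpre.2 x hx)).mp h101⟩

-- ===== VERDICT (by name: the statement is the Claim_ definition above) =====
theorem solution_spec : Claim_unchanged_solution := by
  intro progresses speeds _hdom hpre hnd
  rw [pvA_shape progresses speeds hpre, pvB_shape progresses speeds]
  cases hd : (progresses.zip speeds).map (fun x : Int × Int => solutionDay x.1 x.2) with
  | nil => rfl
  | cons d0 rest =>
    simp only
    have hle : ¬ (101 ≤ (rest.foldl solutionStep (d0, 1, ([] : List Int))).1) := by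
      intro h101
      apply hnd
      rw [pvD_iff progresses speeds hpre, hd]
      by_cases h0 : (101 : Int) ≤ d0
      · exact ⟨d0, List.mem_cons_self, h0⟩
      · by_cases hr : ∃ d ∈ rest, 101 ≤ d
        · rcases hr with ⟨d, hdm, hdd⟩
          exact ⟨d, List.mem_cons_of_mem _ hdm, hdd⟩
        · have := pvFold_leader_le rest d0 1 [] (le_refl 1) (by omega)
            (fun d hdm => by
              by_contra hgt
              exact hr ⟨d, hdm, by omega⟩)
          omega
    rw [if_neg hle]

theorem solution_changed : Claim_changed_solution := by
  unfold Claim_changed_solution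
  refine ⟨by decide, by decide, by decide, ?_, by decide, by decide⟩
  show solution [(-1 : Int)] [(1 : Int)] = []
  rw [pvA_shape [(-1 : Int)] [(1 : Int)] (by decide)]
  decide

theorem solution_tight : Claim_exact_solution := by
  intro progresses speeds _hdom hpre hD
  rw [pvA_shape progresses speeds hpre, pvB_shape progresses speeds]
  rcases (pvD_iff progresses speeds hpre).mp hD with ⟨d, hdm, h101⟩
  cases hd : (progresses.zip speeds).map (fun x : Int × Int => solutionDay x.1 x.2) with
  | nil =>
    rw [hd] at hdm
    cases hdm
  | cons d0 rest =>
    rw [hd] at hdm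
    simp only
    have hlead : 101 ≤ (rest.foldl solutionStep (d0, 1, ([] : List Int))).1 := by
      rcases List.mem_cons.mp hdm with rfl | hmem
      · have := pvFold_leader_mono rest d (1 : Int) [] (le_refl 1)
        omega
      · have := pvFold_leader_ge_mem rest d0 1 [] (le_refl 1) d hmem
        omega
    rw [if_pos hlead]
    intro heq
    have := congrArg List.length heq
    simp at this
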